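-- pv_equiv track=rewrite | github.com/ThiagoRocha1/Listas-Comp1 | lista6thiagorocha.py | fatiar_lista
-- ===== SOURCE A (Python) =====
-- def fatiar_lista (lista):
--
--     pi = 0
--     lista_fatiamento = []
--
--     for letra in range(0,len(lista)):
--
--         posicao_branco = 0
--
--         if lista[letra] == ' ':
--
--             lista_fatiamento += [lista[pi:letra]]
--             posicao_branco = letra
--             pi = letra
--
--
--         if letra == len(lista)-1 :
--             lista_fatiamento += [lista[pi:letra+1]]
--
--     return(lista_fatiamento)
-- ===== SOURCE B (Python) =====
-- def fatiar_lista(lista):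
--     # boundary positions: indices of the spaces
--     spaces = [i for i, c in enumerate(lista) if c == ' ']
--     prev = 0
--     segmentos = []
--     for s in spaces:
--         segmentos.append(lista[prev:s])
--         prev = s
--     if len(lista) > 0:
--         segmentos.append(lista[prev:len(lista)])
--     return segmentos
-- ===== Notes on version B (the rewrite author's own statement) =====
-- stated objective: simpler
-- what changed: B first computes the list of space positions with one enumerate pass, then cuts the string once per boundary and appends the tail segment under a single non-empty guard, instead of A's per-character index loop carrying a slice start and a special case re-tested at every iteration for the last index.
import Mathlib
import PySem

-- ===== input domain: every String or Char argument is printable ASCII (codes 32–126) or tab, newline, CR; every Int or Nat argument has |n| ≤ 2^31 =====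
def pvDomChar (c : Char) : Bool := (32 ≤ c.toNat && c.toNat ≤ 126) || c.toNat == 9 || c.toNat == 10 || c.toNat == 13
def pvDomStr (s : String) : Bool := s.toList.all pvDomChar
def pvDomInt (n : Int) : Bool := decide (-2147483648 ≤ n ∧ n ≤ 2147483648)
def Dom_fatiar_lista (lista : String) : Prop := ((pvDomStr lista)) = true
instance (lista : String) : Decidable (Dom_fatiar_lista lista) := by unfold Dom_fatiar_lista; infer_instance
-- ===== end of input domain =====

-- B is simpler: it collects the space positions once and cuts the string at those boundaries,
-- replacing A's per-character index loop with its last-iteration special case.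

-- ===== PORT A =====
-- state (pi, lista_fatiamento); body: the space branch, then the last-index branch
def fatiar_lista (lista : String) : List String :=
  ((PySem.List.pyRange 0 (PySem.Str.len lista) 1).foldl
    (fun (st : Int × List String) letra =>
      let st := if PySem.Str.pyGet? lista letra == some ' '
                then (letra, st.2 ++ [PySem.Str.slice lista (some st.1) (some letra)])
                else st
      if letra == PySem.Str.len lista - 1
      then (st.1, st.2 ++ [PySem.Str.slice lista (some st.1) (some (letra + 1))])
      else st)
    (0, [])).2

-- ===== PORT B =====
-- spaces = [i for i, c in enumerate(lista) if c == ' ']; one cut per boundary, then the tail segment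
def fatiar_lista_alt (lista : String) : List String :=
  let spaces := ((PySem.List.enumerate lista.toList).filter (fun p => p.2 == ' ')).map (·.1)
  let st := spaces.foldl
    (fun (st : Int × List String) s =>
      (s, st.2 ++ [PySem.Str.slice lista (some st.1) (some s)])) (0, [])
  if PySem.Str.len lista > 0
  then st.2 ++ [PySem.Str.slice lista (some st.1) (some (PySem.Str.len lista))]
  else st.2

-- ===== PRECONDITION & SPEC =====
def Spec_fatiar_lista (lista : String) (out : List String) : Prop := out = fatiar_lista_alt lista
instance (lista : String) (out : List String) : Decidable (Spec_fatiar_lista lista out) := by unfold Spec_fatiar_lista; infer_instance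

-- ===== CLAIM (what is proved, stated in full; the proofs are below) =====
def Claim_equal_fatiar_lista : Prop := ∀ (lista : String), Dom_fatiar_lista lista → Spec_fatiar_lista lista (fatiar_lista lista)

-- ===== LEMMAS AND PROOFS =====

lemma pvGet_nonneg (s : String) (i : Int) (h : 0 ≤ i) :
    PySem.Str.pyGet? s i = s.toList[i.toNat]? := by
  rw [show i = ((i.toNat : Nat) : Int) by omega, PySem.Str.pyGet?_natCast,
    Int.toNat_natCast]

lemma pvSpaces_eq (cs : List Char) (s : Int) :
    ((PySem.List.enumerate cs s).filter (fun p => p.2 == ' ')).map (·.1)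
      = (PySem.List.pyRange s (s + cs.length) 1).filter
          (fun i => cs[(i - s).toNat]? == some ' ') := by
  induction cs generalizing s with
  | nil => simp [PySem.List.enumerate, PySem.List.pyRange_one_eq_nil]
  | cons c cs ih =>
      rw [PySem.List.enumerate_cons,
        PySem.List.pyRange_one_cons (by simp only [List.length_cons]; push_cast; omega)]
      have htail : (PySem.List.pyRange (s + 1) (s + ↑(c :: cs).length) 1).filter
            (fun i => (c :: cs)[(i - s).toNat]? == some ' ')
          = (PySem.List.pyRange (s + 1) (s + 1 + ↑cs.length) 1).filter
              (fun i => cs[(i - (s + 1)).toNat]? == some ' ') := by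
        rw [show s + ((c :: cs).length : Int) = s + 1 + (cs.length : Int) by
          simp only [List.length_cons]; push_cast; omega]
        refine List.filter_congr ?_
        intro i hi
        rw [PySem.List.mem_pyRange_one] at hi
        rw [show (i - s).toNat = (i - (s+1)).toNat + 1 by omega]
        simp
      rw [List.filter_cons, List.filter_cons, htail]
      rw [show (s - s).toNat = 0 by omega]
      by_cases hc : c = ' '
      · simp [hc, ih (s+1)]
      · simp [hc, ih (s+1)]

lemma pv_unroll {β : Type} (f g : β → Int → β) (post : β → β) (N : Int) (hN : 0 < N) (init : β)
    (hf : ∀ st i, 0 ≤ i → i < N - 1 → f st i = g st i)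
    (hlast : ∀ st, f st (N - 1) = post (g st (N - 1))) :
    (PySem.List.pyRange 0 N 1).foldl f init = post ((PySem.List.pyRange 0 N 1).foldl g init) := by
  obtain ⟨M, rfl⟩ : ∃ M, N = M + 1 := ⟨N - 1, by omega⟩
  rw [PySem.List.pyRange_one_succ_right (by omega), List.foldl_concat, List.foldl_concat]
  rw [PySem.List.foldl_congr_mem _ f g init (by
    intro acc x hx
    rw [PySem.List.mem_pyRange_one] at hx
    exact hf acc x hx.1 (by omega))]
  have := hlast ((PySem.List.pyRange 0 M 1).foldl g init)
  rw [show M + 1 - 1 = M by omega] at this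
  exact this

-- A's index loop splits into: the space-only fold over all indices, then the final append;
-- stated for abstract fold bodies so it applies to the ports by unification
lemma pvMain (lista : String) : fatiar_lista lista = fatiar_lista_alt lista := by
  unfold fatiar_lista fatiar_lista_alt
  simp only [PySem.Str.len_eq]
  have hB : (((PySem.List.enumerate lista.toList).filter (fun p => p.2 == ' ')).map (·.1)).foldl
        (fun (st : Int × List String) s =>
          (s, st.2 ++ [PySem.Str.slice lista (some st.1) (some s)])) (0, [])
      = (PySem.List.pyRange 0 (lista.toList.length : Int) 1).foldl
          (fun (st : Int × List String) i =>
            if PySem.Str.pyGet? lista i == some ' '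
            then (i, st.2 ++ [PySem.Str.slice lista (some st.1) (some i)])
            else st) (0, []) := by
    rw [pvSpaces_eq lista.toList 0,
      show (0 : Int) + (lista.toList.length : Int) = (lista.toList.length : Int) by omega,
      List.foldl_filter]
    refine PySem.List.foldl_congr_mem _ _ _ _ ?_
    intro acc i hi
    rw [PySem.List.mem_pyRange_one] at hi
    rw [pvGet_nonneg lista i hi.1, show i - 0 = i by omega]
  rcases Nat.eq_zero_or_pos lista.toList.length with h0 | hpos
  · have hsp : lista.toList = [] := List.length_eq_zero_iff.mp h0
    rw [PySem.List.pyRange_one_eq_nil (by omega)]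
    simp only [List.foldl_nil]
    rw [hsp]
    simp [PySem.List.enumerate]
  · have hNpos : (0 : Int) < (lista.toList.length : Int) := by exact_mod_cast hpos
    rw [if_pos (by exact_mod_cast hpos), hB]
    exact congrArg Prod.snd (pv_unroll _
      (fun (st : Int × List String) i =>
        if PySem.Str.pyGet? lista i == some ' '
        then (i, st.2 ++ [PySem.Str.slice lista (some st.1) (some i)])
        else st)
      (fun (st : Int × List String) =>
        (st.1, st.2 ++ [PySem.Str.slice lista (some st.1) (some (lista.toList.length : Int))]))
      (lista.toList.length : Int) hNpos (0, [])
      (by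
        intro st i h0i h1i
        simp only
        rw [if_neg (by simp only [beq_iff_eq]; omega)])
      (by
        intro st
        simp only [beq_self_eq_true, if_true, sub_add_cancel]))

-- ===== VERDICT (by name: the statement is the Claim_ definition above) =====
theorem fatiar_lista_spec : Claim_equal_fatiar_lista := by
  intro lista _
  unfold Spec_fatiar_lista
  exact pvMain lista
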